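-- pv_equiv track=rewrite | github.com/qiancai/ai-pr-translator | scripts/main_workflow.py | extract_file_diff_from_pr
-- ===== SOURCE A (Python) =====
-- def extract_file_diff_from_pr(pr_diff, source_file_path):
--     """Extract diff content for a specific source file from the complete PR diff"""
--     if not pr_diff:
--         return ""
--
--     filtered_lines = []
--     current_file = None
--     include_section = False
--
--     for line in pr_diff.split('\n'):
--         if line.startswith('File: '):
--             current_file = line.replace('File: ', '').strip()
--             include_section = (current_file == source_file_path)
--             if include_section:
--                 filtered_lines.append(line)
--         elif line.startswith('-' * 80):
--             if include_section:
--                 filtered_lines.append(line)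
--                 include_section = False  # End of this file's section
--         elif include_section:
--             filtered_lines.append(line)
--
--     return '\n'.join(filtered_lines)
-- ===== SOURCE B (Python) =====
-- def extract_file_diff_from_pr(pr_diff, source_file_path):
--     """Extract diff content for a specific source file from the complete PR diff"""
--     if not pr_diff:
--         return ""
--     lines = pr_diff.split('\n')
--     n = len(lines)
--     terminator = '-' * 80
--
--     # partition the lines into blocks, each starting at a 'File: ' header line
--     # (leading lines before the first header are ignored)
--     i = 0
--     while i < n and not lines[i].startswith('File: '):
--         i += 1
--     blocks = []
--     while i < n:
--         j = i + 1
--         while j < n and not lines[j].startswith('File: '):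
--             j += 1
--         blocks.append((lines[i], lines[i + 1:j]))
--         i = j
--
--     out = []
--     for header, body in blocks:
--         if header.replace('File: ', '').strip() == source_file_path:
--             out.append(header)
--             for line in body:
--                 out.append(line)
--                 if line.startswith(terminator):
--                     break
--     return '\n'.join(out)
-- ===== Notes on version B (the rewrite author's own statement) =====
-- stated objective: alternative
-- what changed: Replaces A's single line-by-line pass with a current_file/include_section flag state machine by a two-phase decomposition: first partition the lines into 'File: '-headed blocks (dropping any leading lines before the first header), then emit each matching block's header plus its body up to and including the first 80-dash terminator.
import Mathlib
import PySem

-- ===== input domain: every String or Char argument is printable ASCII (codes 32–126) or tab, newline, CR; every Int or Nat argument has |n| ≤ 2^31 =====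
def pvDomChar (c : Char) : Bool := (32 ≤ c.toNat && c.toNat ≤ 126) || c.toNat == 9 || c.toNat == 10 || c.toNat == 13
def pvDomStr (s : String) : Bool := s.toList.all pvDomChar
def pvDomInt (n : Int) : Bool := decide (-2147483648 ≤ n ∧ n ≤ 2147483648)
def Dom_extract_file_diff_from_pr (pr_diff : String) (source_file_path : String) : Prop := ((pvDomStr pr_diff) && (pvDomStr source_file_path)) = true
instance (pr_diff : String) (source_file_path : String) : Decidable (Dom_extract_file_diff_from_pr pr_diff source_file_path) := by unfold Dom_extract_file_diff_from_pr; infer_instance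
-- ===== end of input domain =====

-- B partitions the diff lines into 'File: '-headed blocks and emits the matching blocks,
-- instead of A's single pass with an include_section flag; objective: alternative decomposition.

-- shared string tests (used by both ports, exactly as both Pythons compute them)
def pvDashes80 : String := String.mk (List.replicate 80 '-')
def pvIsHeader (l : String) : Bool := PySem.Str.startswith l "File: "
def pvHdrName (l : String) : String := PySem.Str.strip (PySem.Str.replace l "File: " "")

-- ===== PORT A =====
def pvStepA (fp : String) (st : List String × Option String × Bool) (line : String) :
    List String × Option String × Bool :=
  let (acc, cf, inc) := st
  if pvIsHeader line then
    let cur := pvHdrName line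
    let inc' := cur == fp
    (if inc' then acc ++ [line] else acc, some cur, inc')
  else if PySem.Str.startswith line pvDashes80 then
    if inc then (acc ++ [line], cf, false) else (acc, cf, inc)
  else if inc then (acc ++ [line], cf, inc)
  else (acc, cf, inc)

def extract_file_diff_from_pr (pr_diff : String) (source_file_path : String) : String :=
  if pr_diff = "" then ""
  else
    PySem.Str.join "\n"
      ((((PySem.Str.split? pr_diff "\n").getD []).foldl (pvStepA source_file_path) ([], none, false)).1)

-- ===== PORT B =====
-- Source B: partition into blocks at header lines (leading non-header lines dropped)
def pvBlocksB : List String → List (String × List String)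
  | [] => []
  | h :: t =>
    (h, t.takeWhile (fun l => !pvIsHeader l)) :: pvBlocksB (t.dropWhile (fun l => !pvIsHeader l))
  termination_by ls => ls.length
  decreasing_by
    exact Nat.lt_succ_of_le (List.length_dropWhile_le _ _)

-- Source B: inner loop over a block body — emit lines up to and including the first terminator
def pvEmitBody : List String → List String
  | [] => []
  | l :: ls => if PySem.Str.startswith l pvDashes80 then [l] else l :: pvEmitBody ls

def extract_file_diff_from_pr_alt (pr_diff : String) (source_file_path : String) : String :=
  if pr_diff = "" then ""
  else
    let lines := (PySem.Str.split? pr_diff "\n").getD []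
    let bs := pvBlocksB (lines.dropWhile (fun l => !pvIsHeader l))
    let out := bs.foldl
      (fun acc b => if pvHdrName b.1 == source_file_path then acc ++ b.1 :: pvEmitBody b.2 else acc)
      []
    PySem.Str.join "\n" out

-- ===== PRECONDITION & SPEC =====
def Spec_extract_file_diff_from_pr (pr_diff : String) (source_file_path : String) (out : String) : Prop := out = extract_file_diff_from_pr_alt pr_diff source_file_path
instance (pr_diff : String) (source_file_path : String) (out : String) : Decidable (Spec_extract_file_diff_from_pr pr_diff source_file_path out) := by unfold Spec_extract_file_diff_from_pr; infer_instance

-- ===== CLAIM (what is proved, stated in full; the proofs are below) =====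
def Claim_equal_extract_file_diff_from_pr : Prop := ∀ (pr_diff : String) (source_file_path : String), Dom_extract_file_diff_from_pr pr_diff source_file_path → Spec_extract_file_diff_from_pr pr_diff source_file_path (extract_file_diff_from_pr pr_diff source_file_path)

-- ===== LEMMAS AND PROOFS =====

-- reference recursion characterising A's flag loop (proof helper only)
def pvProcA (fp : String) (inc : Bool) : List String → List String
  | [] => []
  | l :: ls =>
    if pvIsHeader l then
      (if pvHdrName l == fp then [l] else []) ++ pvProcA fp (pvHdrName l == fp) ls
    else if PySem.Str.startswith l pvDashes80 then
      (if inc then [l] else []) ++ pvProcA fp false ls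
    else
      (if inc then [l] else []) ++ pvProcA fp inc ls

theorem pvFoldA (fp : String) :
    ∀ (ls : List String) (acc : List String) (cf : Option String) (inc : Bool),
      (ls.foldl (pvStepA fp) (acc, cf, inc)).1 = acc ++ pvProcA fp inc ls := by
  intro ls
  induction ls with
  | nil => intro acc cf inc; simp [pvProcA]
  | cons l ls ih =>
    intro acc cf inc
    simp only [List.foldl_cons, pvStepA, pvProcA]
    split_ifs with h1 h2 h3 h4 <;> simp [ih, pvStepA] <;> simp_all

-- with the flag off, leading non-header lines contribute nothing
theorem pvSkip (fp : String) :
    ∀ ls : List String,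
      pvProcA fp false ls = pvProcA fp false (ls.dropWhile (fun l => !pvIsHeader l)) := by
  intro ls
  induction ls with
  | nil => rfl
  | cons l ls ih =>
    by_cases h : pvIsHeader l
    · simp [List.dropWhile_cons, h]
    · simp only [pvProcA, h, if_false, Bool.false_eq_true, List.dropWhile_cons]
      split_ifs with h2 <;> simp_all [pvProcA, h]

-- with the flag on, A emits the body up to the terminator, then continues at the next header
theorem pvBody (fp : String) :
    ∀ t : List String,
      pvProcA fp true t =
        pvEmitBody (t.takeWhile (fun l => !pvIsHeader l)) ++
          pvProcA fp false (t.dropWhile (fun l => !pvIsHeader l)) := by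
  intro t
  induction t with
  | nil => rfl
  | cons l ls ih =>
    by_cases h : pvIsHeader l
    · simp [pvProcA, h, List.takeWhile_cons, List.dropWhile_cons, pvEmitBody]
    · by_cases h2 : PySem.Str.startswith l pvDashes80
      · have h2' : PySem.Chars.startswith l.toList pvDashes80.toList = true := by simpa using h2
        simp [pvProcA, h, h2, h2', List.takeWhile_cons, List.dropWhile_cons, pvEmitBody,
          pvSkip fp ls]
      · have h2' : ¬ PySem.Chars.startswith l.toList pvDashes80.toList = true := by simpa using h2
        simp [pvProcA, h, h2, h2', List.takeWhile_cons, List.dropWhile_cons, pvEmitBody, ih]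

def pvEmitRec (fp : String) : List (String × List String) → List String
  | [] => []
  | b :: bs => (if pvHdrName b.1 == fp then b.1 :: pvEmitBody b.2 else []) ++ pvEmitRec fp bs

theorem pvFoldB (fp : String) :
    ∀ (bs : List (String × List String)) (acc : List String),
      bs.foldl
        (fun acc b => if pvHdrName b.1 == fp then acc ++ b.1 :: pvEmitBody b.2 else acc) acc
      = acc ++ pvEmitRec fp bs := by
  intro bs
  induction bs with
  | nil => intro acc; simp [pvEmitRec]
  | cons b bs ih =>
    intro acc
    rw [List.foldl_cons, ih]
    simp only [pvEmitRec]
    split_ifs <;> simp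

theorem pvDropIdem (p : String → Bool) (ls : List String) :
    (ls.dropWhile p).dropWhile p = ls.dropWhile p := by
  induction ls with
  | nil => rfl
  | cons l ls ih =>
    by_cases h : p l
    · simpa [List.dropWhile_cons, h] using ih
    · simp [List.dropWhile_cons, h]

theorem pvDropHead (p : String → Bool) :
    ∀ (ls : List String) (h : String) (t : List String),
      ls.dropWhile p = h :: t → p h = false := by
  intro ls
  induction ls with
  | nil => intro h t hc; simp at hc
  | cons l ls ih =>
    intro h t hc
    by_cases hp : p l
    · exact ih h t (by simpa [List.dropWhile_cons, hp] using hc)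
    · simp [List.dropWhile_cons, hp] at hc
      rcases hc with ⟨h1, -⟩
      subst h1
      simpa using hp

theorem pvMain (fp : String) :
    ∀ (n : ℕ) (ls : List String), ls.length ≤ n →
      pvProcA fp false ls = pvEmitRec fp (pvBlocksB (ls.dropWhile (fun l => !pvIsHeader l))) := by
  intro n
  induction n with
  | zero =>
    intro ls hl
    have : ls = [] := List.eq_nil_of_length_eq_zero (Nat.le_zero.mp hl)
    subst this
    simp [pvProcA, pvBlocksB, pvEmitRec]
  | succ n ih =>
    intro ls hl
    rcases hd : ls.dropWhile (fun l => !pvIsHeader l) with _ | ⟨h, t⟩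
    · rw [pvSkip fp ls, hd]
      simp [pvProcA, pvBlocksB, pvEmitRec]
    · have hh : pvIsHeader h = true := by
        have := pvDropHead (fun l => !pvIsHeader l) ls h t hd
        simpa using this
      have hlen : t.length ≤ n := by
        have h1 : (h :: t).length ≤ ls.length := by
          rw [← hd]; exact List.length_dropWhile_le _ _
        simp at h1; omega
      have hlen2 : (t.dropWhile (fun l => !pvIsHeader l)).length ≤ n :=
        le_trans (List.length_dropWhile_le _ _) hlen
      rw [pvSkip fp ls, hd]
      simp only [pvBlocksB, pvEmitRec]
      have hrec : pvProcA fp false (t.dropWhile (fun l => !pvIsHeader l)) =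
          pvEmitRec fp (pvBlocksB (t.dropWhile (fun l => !pvIsHeader l))) := by
        have h0 := ih (t.dropWhile (fun l => !pvIsHeader l)) hlen2
        rwa [pvDropIdem] at h0
      have hskip : pvProcA fp false t = pvProcA fp false (t.dropWhile (fun l => !pvIsHeader l)) :=
        pvSkip fp t
      by_cases hinc : (pvHdrName h == fp) = true
      · simp only [pvProcA, hh, if_true, hinc, if_pos]
        rw [pvBody fp t, hrec]
        simp
      · simp only [pvProcA, hh, if_true, hinc]
        simp only [Bool.false_eq_true, if_false, List.nil_append]
        rw [hskip, hrec]

-- ===== VERDICT (by name: the statement is the Claim_ definition above) =====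
theorem extract_file_diff_from_pr_spec : Claim_equal_extract_file_diff_from_pr := by
  intro pr_diff fp _
  unfold Spec_extract_file_diff_from_pr extract_file_diff_from_pr extract_file_diff_from_pr_alt
  by_cases h : pr_diff = ""
  · simp [h]
  · simp only [h, if_false]
    rw [pvFoldA fp _ [] none false, pvFoldB fp]
    rw [pvMain fp ((PySem.Str.split? pr_diff "\n").getD []).length _ le_rfl]
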